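-- pv_equiv track=rewrite | github.com/oblivi-ate/AI_project | ilp_flexible.py | satisfies_condition
-- ===== SOURCE A (Python) =====
-- from itertools import combinations
--
-- def satisfies_condition(solution, n, k, j, s, strict_coverage=True, min_cover=1):
--     """检查解是否满足约束条件，支持宽松和严格覆盖模式"""
--     solution_sets = [set(group) for group in solution]
--     all_items = list(range(n))
--     j_combinations = list(combinations(all_items, j))
--
--     # 检查是否所有j组合都被覆盖
--     for j_comb in j_combinations:
--         if strict_coverage:
--             # 严格覆盖模式：检查所有s元素子集是否都被覆盖
--             s_combinations = list(combinations(j_comb, s))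
--             for s_comb in s_combinations:
--                 s_covered = False
--                 for group in solution_sets:
--                     if set(s_comb).issubset(group):
--                         s_covered = True
--                         break
--                 if not s_covered:
--                     return False
--         else:
--             # 宽松覆盖模式：检查每个j组合中是否有足够多的s组合被覆盖
--             s_combinations = list(combinations(j_comb, s))
--             covered_s_combinations = set()  # 使用集合来避免重复计数
--
--             # 对于每个s组合，检查是否被任何一个解集合覆盖
--             for s_comb in s_combinations:
--                 for group in solution_sets:
--                     if set(s_comb).issubset(group):
--                         covered_s_combinations.add(tuple(sorted(s_comb)))
--
--             # 检查是否有足够多的s组合被覆盖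
--             if len(covered_s_combinations) < min_cover:
--                 return False
--     return True
-- ===== SOURCE B (Python) =====
-- from itertools import combinations
--
-- def satisfies_condition(solution, n, k, j, s, strict_coverage=True, min_cover=1):
--     """Precompute the set of covered s-subsets once; in strict mode the j-loop
--     collapses to a single scan over all s-subsets of range(n)."""
--     items = list(range(n))
--     covered = set()
--     for group in solution:
--         members = sorted(x for x in set(group) if 0 <= x < n)
--         if s <= len(members):
--             covered.update(combinations(members, s))
--     if strict_coverage:
--         if j > len(items) or s > j:
--             # no j-combination, or no s-subset inside one: vacuously satisfied
--             return True
--         return all(c in covered for c in combinations(items, s))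
--     else:
--         if j > len(items):
--             return True
--         if s > j:
--             # every j-combination has zero s-subsets covered
--             return min_cover <= 0
--         for jc in combinations(items, j):
--             if sum(1 for sc in combinations(jc, s) if sc in covered) < min_cover:
--                 return False
--         return True
-- ===== Notes on version B (the rewrite author's own statement) =====
-- stated objective: alternative
-- what changed: B precomputes once the set of all covered s-subsets (per group, the s-subsets of its in-range members), replacing A's inner scan over all solution groups per s-combination by one set-membership lookup, and in strict mode collapses the whole j-combination loop into a single pass over the s-subsets of range(n); intended as faster (measured 4.19x at the largest size both finished, unconfirmed overall since A's early exit can win elsewhere). …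
-- outside the precondition, e.g. on satisfies_condition([[0]], -3, -3, 2, -3, False, 2): A returns True, B raises ValueError
import Mathlib
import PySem

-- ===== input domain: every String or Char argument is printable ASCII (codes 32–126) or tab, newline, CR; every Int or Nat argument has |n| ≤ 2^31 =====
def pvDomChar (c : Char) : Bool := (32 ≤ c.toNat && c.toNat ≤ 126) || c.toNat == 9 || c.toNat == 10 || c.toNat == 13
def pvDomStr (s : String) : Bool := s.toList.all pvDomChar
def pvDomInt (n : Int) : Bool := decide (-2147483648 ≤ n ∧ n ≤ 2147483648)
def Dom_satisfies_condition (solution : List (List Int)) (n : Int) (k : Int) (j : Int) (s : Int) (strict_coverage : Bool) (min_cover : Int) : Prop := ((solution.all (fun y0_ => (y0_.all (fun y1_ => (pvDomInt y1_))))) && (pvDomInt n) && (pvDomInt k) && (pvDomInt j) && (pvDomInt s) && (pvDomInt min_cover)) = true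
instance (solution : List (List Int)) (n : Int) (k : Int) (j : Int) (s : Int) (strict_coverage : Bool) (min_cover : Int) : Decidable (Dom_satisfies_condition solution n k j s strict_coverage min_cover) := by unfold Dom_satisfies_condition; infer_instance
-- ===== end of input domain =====

-- B precomputes the set of covered s-subsets once (one membership lookup instead of a scan
-- over all groups per s-combination) and collapses the strict-mode j-loop.


-- itertools.combinations(xs, r): all length-r sublists of xs, in itertools order
def combos {α : Type} : Nat → List α → List (List α)
  | 0, _ => [[]]
  | _ + 1, [] => []
  | r + 1, x :: xs => ((combos r xs).map (fun t => x :: t)) ++ combos (r + 1) xs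

-- ===== PORT A =====
def satisfies_condition (solution : List (List Int)) (n : Int) (k : Int) (j : Int) (s : Int) (strict_coverage : Bool) (min_cover : Int) : Bool :=
  let solution_sets := solution.map (fun group => PySem.Set.ofList group)
  let all_items := PySem.List.pyRange 0 n 1
  let j_combinations := combos j.toNat all_items
  -- the 'for j_comb … return False … return True' loop, as List.all
  j_combinations.all (fun j_comb =>
    if strict_coverage then
      (combos s.toNat j_comb).all (fun s_comb =>
        -- 'for group …: if subset: covered = True; break' = any
        solution_sets.any (fun group => PySem.Set.issubset (PySem.Set.ofList s_comb) group))
    else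
      let s_combinations := combos s.toNat j_comb
      let covered := s_combinations.foldl (fun (cov : PySem.Set (List Int)) s_comb =>
        solution_sets.foldl (fun cov2 group =>
          if PySem.Set.issubset (PySem.Set.ofList s_comb) group then
            PySem.Set.add cov2 (PySem.List.sorted s_comb (fun x => x) false)
          else cov2) cov) PySem.Set.empty
      !(decide (PySem.Set.len covered < min_cover)))

-- ===== PORT B =====
-- sorted(x for x in set(group) if 0 <= x < n)
def membersB (n : Int) (group : List Int) : List Int :=
  PySem.List.sorted ((PySem.Set.ofList group).filter (fun x => decide (0 ≤ x) && decide (x < n))) (fun x => x) false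

def coveredB (solution : List (List Int)) (n : Int) (s : Int) : PySem.Set (List Int) :=
  solution.foldl (fun cov group =>
    if s ≤ ((membersB n group).length : Int) then
      PySem.Set.update cov (combos s.toNat (membersB n group))
    else cov) PySem.Set.empty

def satisfies_condition_alt (solution : List (List Int)) (n : Int) (k : Int) (j : Int) (s : Int) (strict_coverage : Bool) (min_cover : Int) : Bool :=
  let items := PySem.List.pyRange 0 n 1
  let covered := coveredB solution n s
  if strict_coverage then
    if decide (j > (items.length : Int)) || decide (s > j) then true
    else (combos s.toNat items).all (fun c => PySem.Set.contains covered c)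
  else
    if j > (items.length : Int) then true
    else if s > j then decide (min_cover ≤ 0)
    else
      (combos j.toNat items).all (fun jc =>
        !(decide (((combos s.toNat jc).countP (fun sc => PySem.Set.contains covered sc) : Int) < min_cover)))

-- ===== PRECONDITION & SPEC =====
-- Pre_ excludes negative j or s, where itertools.combinations raises ValueError: A raises for every
-- negative j, and for negative s whenever a j-combination exists; on the remaining excluded corner
-- (negative s with no j-combination) A returns True without inspecting s while B's combinations call raises.
def Pre_satisfies_condition (solution : List (List Int)) (n : Int) (k : Int) (j : Int) (s : Int) (strict_coverage : Bool) (min_cover : Int) : Prop := 0 ≤ j ∧ 0 ≤ s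
instance (solution : List (List Int)) (n : Int) (k : Int) (j : Int) (s : Int) (strict_coverage : Bool) (min_cover : Int) : Decidable (Pre_satisfies_condition solution n k j s strict_coverage min_cover) := by unfold Pre_satisfies_condition; infer_instance

def pvWitness_satisfies_condition : List (List Int) × Int × Int × Int × Int × Bool × Int := ([[0, 1], [1, 2]], 3, 2, 2, 1, true, 1)

def Spec_satisfies_condition (solution : List (List Int)) (n : Int) (k : Int) (j : Int) (s : Int) (strict_coverage : Bool) (min_cover : Int) (out : Bool) : Prop := out = satisfies_condition_alt solution n k j s strict_coverage min_cover
instance (solution : List (List Int)) (n : Int) (k : Int) (j : Int) (s : Int) (strict_coverage : Bool) (min_cover : Int) (out : Bool) : Decidable (Spec_satisfies_condition solution n k j s strict_coverage min_cover out) := by unfold Spec_satisfies_condition; infer_instance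

-- ===== CLAIM (what is proved, stated in full; the proofs are below) =====
def Claim_equal_satisfies_condition : Prop := ∀ (solution : List (List Int)) (n : Int) (k : Int) (j : Int) (s : Int) (strict_coverage : Bool) (min_cover : Int), Dom_satisfies_condition solution n k j s strict_coverage min_cover → Pre_satisfies_condition solution n k j s strict_coverage min_cover → Spec_satisfies_condition solution n k j s strict_coverage min_cover (satisfies_condition solution n k j s strict_coverage min_cover)

-- ===== LEMMAS AND PROOFS =====

lemma mem_combos {α : Type} (r : Nat) (xs l : List α) :
    l ∈ combos r xs ↔ List.Sublist l xs ∧ l.length = r := by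
  induction xs generalizing r l with
  | nil =>
    cases r with
    | zero => simp [combos, List.sublist_nil]
    | succ r =>
      simp only [combos, List.not_mem_nil, false_iff, not_and]
      intro h; rw [List.sublist_nil] at h; subst h; simp
  | cons x xs ih =>
    cases r with
    | zero =>
      simp [combos]
      rintro rfl; exact List.nil_sublist _
    | succ r =>
      simp only [combos, List.mem_append, List.mem_map, ih]
      constructor
      · rintro (⟨t, ⟨hts, htl⟩, rfl⟩ | ⟨hs, hl⟩)
        · exact ⟨List.cons_sublist_cons.mpr hts, by simp [htl]⟩
        · exact ⟨hs.cons x, hl⟩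
      · rintro ⟨hs, hl⟩
        rcases List.sublist_cons_iff.mp hs with h | ⟨t, rfl, ht⟩
        · exact Or.inr ⟨h, hl⟩
        · exact Or.inl ⟨t, ⟨ht, by simpa using hl⟩, rfl⟩

lemma combos_eq_nil_of_lt {α : Type} (r : Nat) (xs : List α) (h : xs.length < r) :
    combos r xs = [] := by
  rw [List.eq_nil_iff_forall_not_mem]
  intro l hl
  rcases (mem_combos r xs l).mp hl with ⟨hs, hlen⟩
  have := hs.length_le
  omega

lemma nodup_combos {α : Type} [DecidableEq α] (r : Nat) (xs : List α) (h : xs.Nodup) :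
    (combos r xs).Nodup := by
  induction xs generalizing r with
  | nil => cases r <;> simp [combos]
  | cons x xs ih =>
    cases r with
    | zero => simp [combos]
    | succ r =>
      have hx : x ∉ xs := (List.nodup_cons.mp h).1
      have hxs : xs.Nodup := (List.nodup_cons.mp h).2
      refine List.Nodup.append ?_ (ih _ hxs) ?_
      · exact (ih _ hxs).map (fun a b hab => by simpa using hab)
      · intro l hl1 hl2
        rcases List.mem_map.mp hl1 with ⟨t, _, rfl⟩
        rcases (mem_combos _ _ _).mp hl2 with ⟨hs, _⟩
        exact hx (hs.subset (by simp))

lemma exists_mid {α : Type} (sc xs : List α) (r : Nat) (h : List.Sublist sc xs)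
    (h1 : sc.length ≤ r) (h2 : r ≤ xs.length) :
    ∃ jc, List.Sublist sc jc ∧ List.Sublist jc xs ∧ jc.length = r := by
  induction xs generalizing sc r with
  | nil =>
    refine ⟨[], ?_, List.Sublist.refl _, ?_⟩
    · simp [List.sublist_nil.mp h]
    · simp at h2 ⊢; omega
  | cons x xs ih =>
    rcases List.sublist_cons_iff.mp h with hsub | ⟨t, rfl, ht⟩
    · by_cases hr : r ≤ xs.length
      · rcases ih sc r hsub h1 hr with ⟨jc, ha, hb, hc⟩
        exact ⟨jc, ha, hb.cons x, hc⟩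
      · have hsl : sc.length ≤ r - 1 := by have := hsub.length_le; simp at h2; omega
        rcases ih sc (r - 1) hsub hsl (by simp at h2 ⊢; omega) with ⟨jc, ha, hb, hc⟩
        refine ⟨x :: jc, ha.cons x, List.cons_sublist_cons.mpr hb, ?_⟩
        simp at h2 ⊢; omega
    · have hr1 : 1 ≤ r := by simp at h1; omega
      rcases ih t (r - 1) ht (by simp at h1; omega) (by simp at h2; omega) with ⟨jc, ha, hb, hc⟩
      refine ⟨x :: jc, List.cons_sublist_cons.mpr ha, List.cons_sublist_cons.mpr hb, ?_⟩
      simp; omega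

lemma sublist_of_subset_sorted (sc ms : List Int) (hsc : sc.Pairwise (· < ·))
    (hms : ms.Pairwise (· < ·)) (h : ∀ x ∈ sc, x ∈ ms) : List.Sublist sc ms := by
  induction ms generalizing sc with
  | nil => cases sc with
    | nil => exact List.Sublist.refl _
    | cons a t => exact absurd (h a (by simp)) (by simp)
  | cons b ms ih =>
    cases sc with
    | nil => exact List.nil_sublist _
    | cons a t =>
      have hpw := List.pairwise_cons.mp hms
      by_cases hab : a = b
      · subst hab
        refine List.cons_sublist_cons.mpr (ih t (List.pairwise_cons.mp hsc).2 hpw.2 ?_)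
        intro y hy
        have hya : a < y := (List.pairwise_cons.mp hsc).1 y hy
        rcases List.mem_cons.mp (h y (by simp [hy])) with rfl | hy'
        · omega
        · exact hy'
      · have ha : a ∈ ms := by
          rcases List.mem_cons.mp (h a (by simp)) with h1 | h'
          · exact absurd h1 hab
          · exact h'
        have hba : b < a := hpw.1 a ha
        refine (ih (a :: t) hsc hpw.2 ?_).cons b
        intro y hy
        rcases List.mem_cons.mp hy with rfl | hy'
        · exact ha
        · have hay : a < y := (List.pairwise_cons.mp hsc).1 y hy'
          rcases List.mem_cons.mp (h y hy) with rfl | h'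
          · omega
          · exact h'

lemma pairwise_membersB (n : Int) (g : List Int) : (membersB n g).Pairwise (· < ·) := by
  have hnd : ((PySem.Set.ofList g).filter (fun x => decide (0 ≤ x) && decide (x < n))).Nodup :=
    (PySem.Set.nodup_ofList g).filter _
  have hperm := PySem.List.sorted_perm ((PySem.Set.ofList g).filter (fun x => decide (0 ≤ x) && decide (x < n))) (fun x => x) false
  have hnd2 : (membersB n g).Nodup := hperm.nodup_iff.mpr hnd
  have hle : (membersB n g).Pairwise (fun a b => (fun x => x) a ≤ (fun x => x) b) :=
    PySem.List.sorted_pairwise _ _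
  exact (hle.and hnd2).imp (fun h => lt_of_le_of_ne h.1 h.2)

lemma mem_membersB (n : Int) (g : List Int) (x : Int) :
    x ∈ membersB n g ↔ x ∈ g ∧ 0 ≤ x ∧ x < n := by
  unfold membersB
  rw [PySem.List.mem_sorted]
  simp [List.mem_filter, PySem.Set.mem_ofList]

lemma mem_coveredB (solution : List (List Int)) (n s : Int) (hs : 0 ≤ s) (y : List Int) :
    y ∈ coveredB solution n s ↔ ∃ g ∈ solution, y ∈ combos s.toNat (membersB n g) := by
  unfold coveredB
  suffices h : ∀ (acc : PySem.Set (List Int)),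
      y ∈ solution.foldl (fun cov group =>
        if s ≤ ((membersB n group).length : Int) then
          PySem.Set.update cov (combos s.toNat (membersB n group))
        else cov) acc
        ↔ y ∈ acc ∨ ∃ g ∈ solution, y ∈ combos s.toNat (membersB n g) by
    simpa [PySem.Set.empty] using h PySem.Set.empty
  induction solution with
  | nil => simp
  | cons g gs ih =>
    intro acc
    have hsn := Int.toNat_of_nonneg hs
    simp only [List.foldl_cons, ih, List.mem_cons]
    by_cases hg : s ≤ ((membersB n g).length : Int)
    · rw [if_pos hg]
      simp only [PySem.Set.mem_update]
      constructor
      · rintro (⟨h | h⟩ | ⟨g', hg', hy⟩)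
        · exact Or.inl h
        · exact Or.inr ⟨g, Or.inl rfl, h⟩
        · exact Or.inr ⟨g', Or.inr hg', hy⟩
      · rintro (h | ⟨g', (rfl | hg'), hy⟩)
        · exact Or.inl (Or.inl h)
        · exact Or.inl (Or.inr hy)
        · exact Or.inr ⟨g', hg', hy⟩
    · rw [if_neg hg]
      have hnil : combos s.toNat (membersB n g) = [] :=
        combos_eq_nil_of_lt _ _ (by omega)
      constructor
      · rintro (h | ⟨g', hg', hy⟩)
        · exact Or.inl h
        · exact Or.inr ⟨g', Or.inr hg', hy⟩
      · rintro (h | ⟨g', (rfl | hg'), hy⟩)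
        · exact Or.inl h
        · rw [hnil] at hy; exact absurd hy (List.not_mem_nil)
        · exact Or.inr ⟨g', hg', hy⟩

-- the per-s_comb cover condition both programs decide
def Covers (solution : List (List Int)) (sc : List Int) : Prop := ∃ g ∈ solution, ∀ x ∈ sc, x ∈ g

lemma coversA_iff (solution : List (List Int)) (sc : List Int) :
    ((solution.map (fun group => PySem.Set.ofList group)).any
      (fun group => PySem.Set.issubset (PySem.Set.ofList sc) group) = true) ↔ Covers solution sc := by
  simp only [List.any_eq_true, List.mem_map, Covers]
  constructor
  · rintro ⟨S, ⟨g, hg, rfl⟩, hsub⟩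
    refine ⟨g, hg, fun x hx => ?_⟩
    have := (PySem.Set.issubset_iff _ _).mp hsub x ((PySem.Set.mem_ofList _ _).mpr hx)
    exact (PySem.Set.mem_ofList _ _).mp this
  · rintro ⟨g, hg, hsub⟩
    refine ⟨PySem.Set.ofList g, ⟨g, hg, rfl⟩, (PySem.Set.issubset_iff _ _).mpr ?_⟩
    intro x hx
    exact (PySem.Set.mem_ofList _ _).mpr (hsub x ((PySem.Set.mem_ofList _ _).mp hx))

lemma coveredB_contains (solution : List (List Int)) (n s : Int) (hs : 0 ≤ s) (sc : List Int)
    (hsub : List.Sublist sc (PySem.List.pyRange 0 n 1)) (hlen : sc.length = s.toNat) :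
    (PySem.Set.contains (coveredB solution n s) sc = true) ↔ Covers solution sc := by
  rw [PySem.Set.contains_iff, mem_coveredB solution n s hs]
  have hscpw : sc.Pairwise (· < ·) := (PySem.List.pairwise_lt_pyRange_one 0 n).sublist hsub
  have hrange : ∀ x ∈ sc, 0 ≤ x ∧ x < n := by
    intro x hx
    have := hsub.subset hx
    rw [PySem.List.mem_pyRange_one] at this
    exact this
  unfold Covers
  apply exists_congr; intro g
  apply and_congr_right; intro _
  rw [mem_combos]
  constructor
  · rintro ⟨hs, _⟩
    intro x hx
    exact ((mem_membersB n g x).mp (hs.subset hx)).1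
  · intro h
    refine ⟨sublist_of_subset_sorted sc _ hscpw (pairwise_membersB n g) ?_, hlen⟩
    intro x hx
    exact (mem_membersB n g x).mpr ⟨h x hx, (hrange x hx).1, (hrange x hx).2⟩

lemma inner_fold (groups : List (PySem.Set Int)) (cov : PySem.Set (List Int)) (X : List Int)
    (c : PySem.Set Int → Bool) :
    groups.foldl (fun cov2 g => if c g then PySem.Set.add cov2 X else cov2) cov
      = if groups.any c then PySem.Set.add cov X else cov := by
  induction groups generalizing cov with
  | nil => simp
  | cons g gs ih =>
    simp only [List.foldl_cons, List.any_cons]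
    have hXmem : X ∈ PySem.Set.add cov X := (PySem.Set.mem_add _ _ _).mpr (Or.inr rfl)
    by_cases hg : c g = true
    · simp only [hg, if_true, Bool.true_or, ih]
      by_cases hgs : gs.any c = true <;> simp [hgs]
    · simp only [Bool.not_eq_true] at hg
      simp [hg, ih]

lemma cond_fold (l : List (List Int)) (p : List Int → Bool) (acc : PySem.Set (List Int))
    (hnd : l.Nodup) (hdisj : ∀ x ∈ l, x ∉ acc) :
    l.foldl (fun a x => if p x then PySem.Set.add a x else a) acc = acc ++ l.filter p := by
  induction l generalizing acc with
  | nil => simp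
  | cons x xs ih =>
    have hx : x ∉ acc := hdisj x (by simp)
    have hnx : x ∉ xs := (List.nodup_cons.mp hnd).1
    simp only [List.foldl_cons, List.filter_cons]
    by_cases hp : p x = true
    · simp only [hp, if_true]
      rw [PySem.Set.add_of_not_mem hx,
        ih (acc ++ [x]) (List.nodup_cons.mp hnd).2 ?_]
      · simp
      · intro y hy hmem
        rcases List.mem_append.mp hmem with h | h
        · exact hdisj y (by simp [hy]) h
        · simp only [List.mem_singleton] at h
          subst h; exact hnx hy
    · simp only [Bool.not_eq_true] at hp
      simp only [hp, Bool.false_eq_true, if_false]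
      rw [ih acc (List.nodup_cons.mp hnd).2 (fun y hy => hdisj y (by simp [hy]))]

lemma all_congr_mem {α : Type} (l : List α) (f g : α → Bool) (h : ∀ x ∈ l, f x = g x) :
    l.all f = l.all g := by
  induction l with
  | nil => rfl
  | cons x xs ih => simp only [List.all_cons, h x (by simp),
      ih (fun y hy => h y (by simp [hy]))]

-- ===== VERDICT (by name: the statement is the Claim_ definition above) =====
theorem satisfies_condition_spec : Claim_equal_satisfies_condition := by
  intro solution n k j s strict_coverage min_cover _hdom hpre
  obtain ⟨hj, hs⟩ := hpre
  unfold Spec_satisfies_condition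
  have hjn := Int.toNat_of_nonneg hj
  have hsn := Int.toNat_of_nonneg hs
  have hpwI : (PySem.List.pyRange 0 n 1).Pairwise (· < ·) := PySem.List.pairwise_lt_pyRange_one 0 n
  have hndI : (PySem.List.pyRange 0 n 1).Nodup := PySem.List.nodup_pyRange_one 0 n
  cases strict_coverage
  case true =>
    simp only [satisfies_condition, satisfies_condition_alt, if_true]
    rw [Bool.eq_iff_iff]
    by_cases h1 : j > ((PySem.List.pyRange 0 n 1).length : Int)
    · have hnil : combos j.toNat (PySem.List.pyRange 0 n 1) = [] :=
        combos_eq_nil_of_lt _ _ (by omega)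
      rw [if_pos (by simp only [Bool.or_eq_true, decide_eq_true_eq]; exact Or.inl h1)]
      simp [hnil]
    · by_cases h2 : s > j
      · have hinner : ∀ jc ∈ combos j.toNat (PySem.List.pyRange 0 n 1), combos s.toNat jc = [] := by
          intro jc hjc
          rcases (mem_combos _ _ _).mp hjc with ⟨_, hlen⟩
          exact combos_eq_nil_of_lt _ _ (by omega)
        rw [if_pos (by simp only [Bool.or_eq_true, decide_eq_true_eq]; exact Or.inr h2)]
        simp only [iff_true, List.all_eq_true]
        intro jc hjc
        rw [hinner jc hjc]
        simp
      · have hcond : ¬ ((decide (j > ((PySem.List.pyRange 0 n 1).length : Int)) || decide (s > j)) = true) := by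
          simp only [Bool.or_eq_true, decide_eq_true_eq]
          rintro (h | h)
          exacts [h1 h, h2 h]
        rw [if_neg hcond]
        simp only [List.all_eq_true]
        constructor
        · intro hA sc hsc
          rcases (mem_combos _ _ _).mp hsc with ⟨hsub, hslen⟩
          rw [coveredB_contains solution n s hs sc hsub hslen]
          obtain ⟨jc, hsj, hji, hjlen⟩ := exists_mid sc _ j.toNat hsub (by omega) (by omega)
          have hjc : jc ∈ combos j.toNat (PySem.List.pyRange 0 n 1) := (mem_combos _ _ _).mpr ⟨hji, hjlen⟩
          have hscm : sc ∈ combos s.toNat jc := (mem_combos _ _ _).mpr ⟨hsj, hslen⟩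
          exact (coversA_iff _ _).mp (hA jc hjc sc hscm)
        · intro hB jc hjc sc hsc
          rcases (mem_combos _ _ _).mp hjc with ⟨hji, _⟩
          rcases (mem_combos _ _ _).mp hsc with ⟨hsj, hslen⟩
          have hsub := hsj.trans hji
          have hmem : sc ∈ combos s.toNat (PySem.List.pyRange 0 n 1) := (mem_combos _ _ _).mpr ⟨hsub, hslen⟩
          exact (coversA_iff _ _).mpr ((coveredB_contains solution n s hs sc hsub hslen).mp (hB sc hmem))
  case false =>
    simp only [satisfies_condition, satisfies_condition_alt, Bool.false_eq_true, if_false]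
    by_cases hb1 : j > ((PySem.List.pyRange 0 n 1).length : Int)
    · rw [if_pos hb1, combos_eq_nil_of_lt j.toNat _ (by omega)]
      simp
    · rw [if_neg hb1]
      by_cases hb2 : s > j
      · rw [if_pos hb2]
        obtain ⟨jc0, _, hji0, hjlen0⟩ :=
          exists_mid [] (PySem.List.pyRange 0 n 1) j.toNat (List.nil_sublist _) (by simp) (by omega)
        have hmem0 : jc0 ∈ combos j.toNat (PySem.List.pyRange 0 n 1) :=
          (mem_combos _ _ _).mpr ⟨hji0, hjlen0⟩
        have hscnil : ∀ jc ∈ combos j.toNat (PySem.List.pyRange 0 n 1), combos s.toNat jc = [] := by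
          intro jc hjc
          rcases (mem_combos _ _ _).mp hjc with ⟨_, hlen⟩
          exact combos_eq_nil_of_lt _ _ (by omega)
        rw [Bool.eq_iff_iff]
        simp only [List.all_eq_true, decide_eq_true_eq]
        constructor
        · intro h
          have := h jc0 hmem0
          rw [hscnil jc0 hmem0] at this
          simp only [List.foldl_nil] at this
          simp only [PySem.Set.empty, PySem.Set.len, Bool.not_eq_eq_eq_not, Bool.not_true,
            decide_eq_false_iff_not, not_lt] at this
          simpa using this
        · intro h jc hjc
          rw [hscnil jc hjc]
          simp only [List.foldl_nil]
          simp only [PySem.Set.empty, PySem.Set.len, Bool.not_eq_eq_eq_not, Bool.not_true,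
            decide_eq_false_iff_not, not_lt]
          simpa using h
      · rw [if_neg hb2]
        apply all_congr_mem
        intro jc hjc
        rcases (mem_combos _ _ _).mp hjc with ⟨hji, _⟩
        have hndjc : jc.Nodup := hndI.sublist hji
        have e1 : (fun (cov : PySem.Set (List Int)) s_comb =>
            (solution.map (fun group => PySem.Set.ofList group)).foldl (fun cov2 group =>
              if PySem.Set.issubset (PySem.Set.ofList s_comb) group then
                PySem.Set.add cov2 (PySem.List.sorted s_comb (fun x => x) false)
              else cov2) cov)
            = (fun (cov : PySem.Set (List Int)) s_comb =>
                if (solution.map (fun group => PySem.Set.ofList group)).any (fun group =>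
                    PySem.Set.issubset (PySem.Set.ofList s_comb) group) then
                  PySem.Set.add cov (PySem.List.sorted s_comb (fun x => x) false)
                else cov) := by
          funext cov s_comb
          exact inner_fold _ _ _ _
        rw [e1, PySem.List.foldl_congr_mem (combos s.toNat jc) _
            (fun (cov : PySem.Set (List Int)) s_comb =>
              if (solution.map (fun group => PySem.Set.ofList group)).any (fun group =>
                  PySem.Set.issubset (PySem.Set.ofList s_comb) group) then
                PySem.Set.add cov s_comb
              else cov) _ ?_]
        · rw [cond_fold _ _ _ (nodup_combos _ _ hndjc) (by simp [PySem.Set.empty])]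
          have hcount : ((combos s.toNat jc).countP (fun sc =>
                (solution.map (fun group => PySem.Set.ofList group)).any (fun group =>
                  PySem.Set.issubset (PySem.Set.ofList sc) group)))
              = (combos s.toNat jc).countP (fun sc => PySem.Set.contains (coveredB solution n s) sc) := by
            apply List.countP_congr
            intro sc hsc
            rcases (mem_combos _ _ _).mp hsc with ⟨hsj, hslen⟩
            rw [coversA_iff, coveredB_contains solution n s hs sc (hsj.trans hji) hslen]
          simp only [PySem.Set.empty, List.nil_append, PySem.Set.len,
            ← List.countP_eq_length_filter, hcount]
        · intro acc sc hsc
          rcases (mem_combos _ _ _).mp hsc with ⟨hsj, _⟩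
          have hpw : sc.Pairwise (fun a b => (fun x => x) a ≤ (fun x => x) b) :=
            ((hpwI.sublist hji).sublist hsj).imp le_of_lt
          rw [PySem.List.sorted_eq_self_of_pairwise sc _ hpw]
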